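-- pv_equiv track=rewrite | github.com/jstep750/VideoOcr | video-ocr/a_code_union.py | compare_items_num
-- ===== SOURCE A (Python) =====
-- def compare_items_num(str1, str2):
--     dic = {}
--     res = 0
--     for c in str1:
--         if(c not in dic): dic[c] = 0
--         dic[c] += 1
--     for c in str2:
--         if(c not in dic): dic[c] = 0
--         dic[c] -= 1
--
--     for k in dic:
--         res += abs(dic[k])
--
--     return res
-- ===== SOURCE B (Python) =====
-- def compare_items_num(str1, str2):
--     a = sorted(str1)
--     b = sorted(str2)
--     i = j = res = 0
--     while i < len(a) and j < len(b):
--         if a[i] == b[j]: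
--             i += 1
--             j += 1
--         elif a[i] < b[j]:
--             res += 1
--             i += 1
--         else:
--             res += 1
--             j += 1
--     return res + (len(a) - i) + (len(b) - j)
-- ===== Notes on version B (the rewrite author's own statement) =====
-- stated objective: alternative
-- what changed: Replaces the dict-of-count-differences (build counter over both strings, then sum absolute values) by sorting both strings and counting unmatched characters with a two-pointer merge walk.
import Mathlib
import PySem

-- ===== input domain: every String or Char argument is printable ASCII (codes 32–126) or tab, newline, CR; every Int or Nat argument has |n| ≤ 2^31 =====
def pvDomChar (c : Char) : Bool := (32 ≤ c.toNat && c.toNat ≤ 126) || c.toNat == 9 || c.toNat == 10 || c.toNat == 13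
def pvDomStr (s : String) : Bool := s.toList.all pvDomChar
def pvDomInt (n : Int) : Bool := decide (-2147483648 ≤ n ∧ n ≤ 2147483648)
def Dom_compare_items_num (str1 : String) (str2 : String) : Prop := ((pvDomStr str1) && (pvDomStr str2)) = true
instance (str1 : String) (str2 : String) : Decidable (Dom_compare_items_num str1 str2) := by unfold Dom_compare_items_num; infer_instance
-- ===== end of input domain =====

-- B replaces A's dict of count differences by a sort-plus-two-pointer merge walk; alternative decomposition, same result.


-- ===== PORT A =====
-- 'if c not in dic: dic[c] = 0; dic[c] += 1' (and the '-= 1' twin), literally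
def pvStepInc (d : PySem.Dict Char Int) (c : Char) : PySem.Dict Char Int :=
  let d' := if d.contains c then d else d.insert c 0
  d'.insert c (d'.getD c 0 + 1)

def pvStepDec (d : PySem.Dict Char Int) (c : Char) : PySem.Dict Char Int :=
  let d' := if d.contains c then d else d.insert c 0
  d'.insert c (d'.getD c 0 - 1)

def compare_items_num (str1 : String) (str2 : String) : Int :=
  let dic := str1.toList.foldl pvStepInc PySem.Dict.empty
  let dic := str2.toList.foldl pvStepDec dic
  -- 'for k in dic: res += abs(dic[k])' — every k is a key of dic, so dic[k] = getD k 0 exactly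
  dic.keys.foldl (fun res k => res + |dic.getD k 0|) 0

-- ===== PORT B =====
-- the while-loop over indices i, j of the two sorted lists, as recursion on the suffixes
def pvMerge : List Char → List Char → Int
  | [], ys => (ys.length : Int)
  | x :: xs, [] => ((x :: xs).length : Int)
  | x :: xs, y :: ys =>
    if x = y then pvMerge xs ys
    else if x < y then 1 + pvMerge xs (y :: ys)
    else 1 + pvMerge (x :: xs) ys
  termination_by xs ys => xs.length + ys.length

def compare_items_num_alt (str1 : String) (str2 : String) : Int :=
  pvMerge (PySem.List.sorted str1.toList (fun c => c) false)
          (PySem.List.sorted str2.toList (fun c => c) false)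

-- ===== PRECONDITION & SPEC =====
def Spec_compare_items_num (str1 : String) (str2 : String) (out : Int) : Prop := out = compare_items_num_alt str1 str2
instance (str1 : String) (str2 : String) (out : Int) : Decidable (Spec_compare_items_num str1 str2 out) := by unfold Spec_compare_items_num; infer_instance

-- ===== CLAIM (what is proved, stated in full; the proofs are below) =====
def Claim_equal_compare_items_num : Prop := ∀ (str1 : String) (str2 : String), Dom_compare_items_num str1 str2 → Spec_compare_items_num str1 str2 (compare_items_num str1 str2)

-- ===== LEMMAS AND PROOFS =====

-- the common value: sum over the distinct characters of both strings of |count₁ - count₂|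
def pvSF (xs ys : List Char) : Int :=
  ∑ c ∈ (xs ++ ys).toFinset, |(xs.count c : Int) - (ys.count c : Int)|

-- ---------- A-side: the dict holds count₁ - count₂ at every key, keys are the distinct chars ----------

lemma getD_pvStepInc (d : PySem.Dict Char Int) (c v : Char) :
    (pvStepInc d c).getD v 0 = d.getD v 0 + if v = c then 1 else 0 := by
  unfold pvStepInc
  by_cases hc : d.contains c = true
  · simp only [hc, if_true, PySem.Dict.getD_insert]
    split_ifs with h <;> simp [h]
  · simp only [Bool.not_eq_true] at hc
    simp only [hc, Bool.false_eq_true, if_false, PySem.Dict.getD_insert]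
    split_ifs with h
    · subst h; simp [PySem.Dict.getD_of_not_contains d 0 hc]
    · simp

lemma getD_pvStepDec (d : PySem.Dict Char Int) (c v : Char) :
    (pvStepDec d c).getD v 0 = d.getD v 0 - if v = c then 1 else 0 := by
  unfold pvStepDec
  by_cases hc : d.contains c = true
  · simp only [hc, if_true, PySem.Dict.getD_insert]
    split_ifs with h <;> simp [h]
  · simp only [Bool.not_eq_true] at hc
    simp only [hc, Bool.false_eq_true, if_false, PySem.Dict.getD_insert]
    split_ifs with h
    · subst h; simp [PySem.Dict.getD_of_not_contains d 0 hc]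
    · simp

lemma getD_foldl_pvStepInc (l : List Char) (d : PySem.Dict Char Int) (v : Char) :
    (l.foldl pvStepInc d).getD v 0 = d.getD v 0 + l.count v := by
  induction l generalizing d with
  | nil => simp
  | cons c t ih =>
    simp only [List.foldl_cons, ih, getD_pvStepInc, List.count_cons]
    by_cases h : v = c
    · simp [h]; omega
    · have : (c == v) = false := by simp [beq_eq_false_iff_ne]; exact fun e => h e.symm
      simp [h, this]

lemma getD_foldl_pvStepDec (l : List Char) (d : PySem.Dict Char Int) (v : Char) :
    (l.foldl pvStepDec d).getD v 0 = d.getD v 0 - l.count v := by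
  induction l generalizing d with
  | nil => simp
  | cons c t ih =>
    simp only [List.foldl_cons, ih, getD_pvStepDec, List.count_cons]
    by_cases h : v = c
    · simp [h]; omega
    · have : (c == v) = false := by simp [beq_eq_false_iff_ne]; exact fun e => h e.symm
      simp [h, this]

lemma keys_pvStepInc (d : PySem.Dict Char Int) (c : Char) :
    (pvStepInc d c).keys = if c ∈ d.keys then d.keys else d.keys ++ [c] := by
  unfold pvStepInc
  by_cases hc : d.contains c = true
  · have hm : c ∈ d.keys := (PySem.Dict.contains_iff_mem_keys d c).mp hc
    simp only [hc, if_true, hm]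
    exact PySem.Dict.keys_insert_of_contains d _ hc
  · simp only [Bool.not_eq_true] at hc
    have hm : c ∉ d.keys := fun h => by
      simp [(PySem.Dict.contains_iff_mem_keys d c).mpr h] at hc
    simp only [hc, Bool.false_eq_true, if_false, hm]
    rw [PySem.Dict.keys_insert_of_contains _ _ (PySem.Dict.contains_insert_self d c 0),
      PySem.Dict.keys_insert_of_not_contains d _ hc]

lemma keys_pvStepDec (d : PySem.Dict Char Int) (c : Char) :
    (pvStepDec d c).keys = if c ∈ d.keys then d.keys else d.keys ++ [c] := by
  unfold pvStepDec
  by_cases hc : d.contains c = true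
  · have hm : c ∈ d.keys := (PySem.Dict.contains_iff_mem_keys d c).mp hc
    simp only [hc, if_true, hm]
    exact PySem.Dict.keys_insert_of_contains d _ hc
  · simp only [Bool.not_eq_true] at hc
    have hm : c ∉ d.keys := fun h => by
      simp [(PySem.Dict.contains_iff_mem_keys d c).mpr h] at hc
    simp only [hc, Bool.false_eq_true, if_false, hm]
    rw [PySem.Dict.keys_insert_of_contains _ _ (PySem.Dict.contains_insert_self d c 0),
      PySem.Dict.keys_insert_of_not_contains d _ hc]

-- membership and nodup of keys through any fold whose step appends exactly the fresh key
lemma mem_keys_foldl_step (g : PySem.Dict Char Int → Char → PySem.Dict Char Int)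
    (hg : ∀ d c, (g d c).keys = if c ∈ d.keys then d.keys else d.keys ++ [c])
    (l : List Char) (d : PySem.Dict Char Int) (v : Char) :
    v ∈ (l.foldl g d).keys ↔ v ∈ d.keys ∨ v ∈ l := by
  induction l generalizing d with
  | nil => simp
  | cons c t ih =>
    simp only [List.foldl_cons, ih, hg, List.mem_cons]
    split_ifs with h
    · constructor
      · rintro (hv | hv) <;> tauto
      · rintro (hv | hv | hv) <;> try tauto
        subst hv; exact Or.inl h
    · simp only [List.mem_append, List.mem_singleton]
      tauto

lemma nodup_keys_foldl_step (g : PySem.Dict Char Int → Char → PySem.Dict Char Int)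
    (hg : ∀ d c, (g d c).keys = if c ∈ d.keys then d.keys else d.keys ++ [c])
    (l : List Char) (d : PySem.Dict Char Int) (hd : d.keys.Nodup) :
    (l.foldl g d).keys.Nodup := by
  induction l generalizing d with
  | nil => exact hd
  | cons c t ih =>
    simp only [List.foldl_cons]
    apply ih
    rw [hg]
    split_ifs with h
    · exact hd
    · have hds : ∀ a ∈ d.keys, ¬ a = c := fun a ha e => h (e ▸ ha)
      simp [List.nodup_append, hd]
      exact hds

lemma foldl_add_abs (f : Char → Int) (K : List Char) (a : Int) :
    K.foldl (fun res k => res + f k) a = a + (K.map f).sum := by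
  induction K generalizing a with
  | nil => simp
  | cons k t ih => simp [ih]; ring

lemma compare_items_num_eq_pvSF (str1 str2 : String) :
    compare_items_num str1 str2 = pvSF str1.toList str2.toList := by
  unfold compare_items_num pvSF
  set l1 := str1.toList
  set l2 := str2.toList
  set d2 := l2.foldl pvStepDec (l1.foldl pvStepInc PySem.Dict.empty) with hd2
  have hget : ∀ v, d2.getD v 0 = (l1.count v : Int) - (l2.count v : Int) := by
    intro v
    rw [hd2, getD_foldl_pvStepDec, getD_foldl_pvStepInc]
    simp
  have hmem : ∀ v, v ∈ d2.keys ↔ v ∈ l1 ∨ v ∈ l2 := by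
    intro v
    rw [hd2, mem_keys_foldl_step pvStepDec keys_pvStepDec,
      mem_keys_foldl_step pvStepInc keys_pvStepInc]
    simp [PySem.Dict.keys_empty]
  have hnd : d2.keys.Nodup := by
    rw [hd2]
    apply nodup_keys_foldl_step pvStepDec keys_pvStepDec
    apply nodup_keys_foldl_step pvStepInc keys_pvStepInc
    simp [PySem.Dict.keys_empty]
  have htf : d2.keys.toFinset = (l1 ++ l2).toFinset := by
    apply Finset.ext
    intro c
    simp [List.mem_toFinset, hmem]
  rw [foldl_add_abs, zero_add]
  rw [← List.sum_toFinset _ hnd, htf]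
  apply Finset.sum_congr rfl
  intro c _
  rw [hget]

-- ---------- B-side: the merge walk computes the same sum ----------

lemma pvSF_comm (xs ys : List Char) : pvSF xs ys = pvSF ys xs := by
  unfold pvSF
  have htf : (xs ++ ys).toFinset = (ys ++ xs).toFinset := by
    apply Finset.ext; intro c; simp; tauto
  rw [htf]
  apply Finset.sum_congr rfl
  intro c _
  rw [abs_sub_comm]

lemma pvSF_nil (ys : List Char) : pvSF [] ys = (ys.length : Int) := by
  unfold pvSF
  simp only [List.nil_append, List.count_nil, Nat.cast_zero, zero_sub, abs_neg, abs_of_nonneg (Int.natCast_nonneg _)]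
  rw [← Nat.cast_sum]
  congr 1
  simpa using Multiset.toFinset_sum_count_eq (ys : Multiset Char)

lemma pvSF_cons_cons (x : Char) (xs ys : List Char) :
    pvSF (x :: xs) (x :: ys) = pvSF xs ys := by
  unfold pvSF
  have hF : ∀ c, |((x :: xs).count c : Int) - ((x :: ys).count c : Int)|
      = |(xs.count c : Int) - (ys.count c : Int)| := by
    intro c
    rcases Bool.eq_false_or_eq_true (x == c) with h | h
    · simp [List.count_cons, h]
    · simp [List.count_cons, h]
  have htf : ((x :: xs) ++ (x :: ys)).toFinset = insert x ((xs ++ ys).toFinset) := by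
    apply Finset.ext; intro c; simp
  rw [htf]
  calc ∑ c ∈ insert x ((xs ++ ys).toFinset), |((x :: xs).count c : Int) - ((x :: ys).count c : Int)|
      = ∑ c ∈ insert x ((xs ++ ys).toFinset), |(xs.count c : Int) - (ys.count c : Int)| :=
        Finset.sum_congr rfl (fun c _ => hF c)
    _ = ∑ c ∈ (xs ++ ys).toFinset, |(xs.count c : Int) - (ys.count c : Int)| := by
        apply Finset.sum_insert_of_eq_zero_if_notMem
        intro hx
        simp only [List.toFinset_append, Finset.mem_union, List.mem_toFinset] at hx
        rw [not_or] at hx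
        simp [List.count_eq_zero_of_not_mem hx.1, List.count_eq_zero_of_not_mem hx.2]

lemma pvSF_cons_left (x : Char) (xs ys : List Char) (hx : x ∉ ys) :
    pvSF (x :: xs) ys = 1 + pvSF xs ys := by
  unfold pvSF
  have hcy : ys.count x = 0 := List.count_eq_zero_of_not_mem hx
  have htf : ((x :: xs) ++ ys).toFinset = insert x ((xs ++ ys).toFinset) := by
    apply Finset.ext; intro c; simp
  have hFne : ∀ c, c ≠ x → |((x :: xs).count c : Int) - (ys.count c : Int)|
      = |(xs.count c : Int) - (ys.count c : Int)| := by
    intro c hc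
    have hne : (x == c) = false := beq_eq_false_iff_ne.mpr (fun e => hc e.symm)
    simp [List.count_cons, hne]
  have hFx : |((x :: xs).count x : Int) - (ys.count x : Int)| = (xs.count x : Int) + 1 := by
    simp only [List.count_cons, hcy, beq_self_eq_true, if_true, Nat.cast_zero, sub_zero,
      Nat.cast_add, Nat.cast_one]
    exact abs_of_nonneg (by positivity)
  rw [htf]
  set T := (xs ++ ys).toFinset with hT
  by_cases hxT : x ∈ T
  · have h1 : (insert x T) = T := Finset.insert_eq_self.mpr hxT
    rw [h1]
    rw [← Finset.add_sum_erase T _ hxT, ← Finset.add_sum_erase T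
      (fun c => |(xs.count c : Int) - (ys.count c : Int)|) hxT]
    have : ∑ c ∈ T.erase x, |((x :: xs).count c : Int) - (ys.count c : Int)|
        = ∑ c ∈ T.erase x, |(xs.count c : Int) - (ys.count c : Int)| := by
      apply Finset.sum_congr rfl
      intro c hc
      exact hFne c (Finset.ne_of_mem_erase hc)
    rw [this, hFx]
    have hFx0 : |(xs.count x : Int) - (ys.count x : Int)| = (xs.count x : Int) := by
      simp [hcy]
    rw [hFx0]
    ring
  · have hxxs : x ∉ xs := by
      intro h
      exact hxT (by simp [hT, List.mem_toFinset, h])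
    have hc0 : xs.count x = 0 := List.count_eq_zero_of_not_mem hxxs
    rw [Finset.sum_insert hxT, hFx, hc0]
    have : ∑ c ∈ T, |((x :: xs).count c : Int) - (ys.count c : Int)|
        = ∑ c ∈ T, |(xs.count c : Int) - (ys.count c : Int)| := by
      apply Finset.sum_congr rfl
      intro c hc
      apply hFne
      intro h
      exact hxT (h ▸ hc)
    rw [this]
    push_cast
    ring

lemma not_mem_of_lt_head (x y : Char) (ys : List Char)
    (hy : (y :: ys).Pairwise (· ≤ ·)) (hlt : x < y) : x ∉ y :: ys := by
  intro hmem
  rcases List.mem_cons.mp hmem with h | h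
  · exact absurd h (ne_of_lt hlt)
  · have := (List.pairwise_cons.mp hy).1 x h
    exact absurd (lt_of_lt_of_le hlt this) (lt_irrefl x)

lemma pvMerge_eq_pvSF (n : Nat) : ∀ (xs ys : List Char), xs.length + ys.length ≤ n →
    xs.Pairwise (· ≤ ·) → ys.Pairwise (· ≤ ·) → pvMerge xs ys = pvSF xs ys := by
  induction n with
  | zero =>
    intro xs ys hn _ _
    have hx : xs = [] := List.eq_nil_of_length_eq_zero (by omega)
    have hy : ys = [] := List.eq_nil_of_length_eq_zero (by omega)
    subst hx; subst hy
    simp [pvMerge, pvSF_nil]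
  | succ n ih =>
    intro xs ys hn hxs hys
    match xs, ys with
    | [], ys => simp [pvMerge, pvSF_nil]
    | x :: xs, [] =>
      rw [pvSF_comm, pvSF_nil]
      simp [pvMerge]
    | x :: xs, y :: ys =>
      simp only [pvMerge]
      by_cases hxy : x = y
      · subst hxy
        rw [if_pos rfl, pvSF_cons_cons]
        exact ih xs ys (by simp at hn ⊢; omega) (List.Pairwise.sublist (by simp) hxs)
          (List.Pairwise.sublist (by simp) hys)
      · rw [if_neg hxy]
        by_cases hlt : x < y
        · rw [if_pos hlt]
          rw [ih xs (y :: ys) (by simp at hn ⊢; omega)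
            (List.Pairwise.sublist (by simp) hxs) hys]
          rw [pvSF_cons_left x xs (y :: ys) (not_mem_of_lt_head x y ys hys hlt)]
        · rw [if_neg hlt]
          have hylt : y < x := lt_of_le_of_ne (le_of_not_gt hlt) (fun h => hxy h.symm)
          have hrhs : pvSF (x :: xs) (y :: ys) = 1 + pvSF (x :: xs) ys := by
            rw [pvSF_comm (x :: xs) (y :: ys), pvSF_cons_left y ys (x :: xs)
              (not_mem_of_lt_head y x xs hxs hylt), pvSF_comm ys (x :: xs)]
          rw [ih (x :: xs) ys (by simp at hn ⊢; omega) hxs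
            (List.Pairwise.sublist (by simp) hys), hrhs]

lemma compare_items_num_alt_eq_pvSF (str1 str2 : String) :
    compare_items_num_alt str1 str2 = pvSF str1.toList str2.toList := by
  unfold compare_items_num_alt
  set s1 := PySem.List.sorted str1.toList (fun c => c) false with h1
  set s2 := PySem.List.sorted str2.toList (fun c => c) false with h2
  have hp1 : s1.Pairwise (· ≤ ·) := by
    have := PySem.List.sorted_pairwise str1.toList (fun c => c)
    simpa [h1] using this
  have hp2 : s2.Pairwise (· ≤ ·) := by
    have := PySem.List.sorted_pairwise str2.toList (fun c => c)
    simpa [h2] using this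
  rw [pvMerge_eq_pvSF (s1.length + s2.length) s1 s2 le_rfl hp1 hp2]
  -- pvSF is invariant under permutation of each argument
  have hperm1 : s1.Perm str1.toList := PySem.List.sorted_perm _ _ _
  have hperm2 : s2.Perm str2.toList := PySem.List.sorted_perm _ _ _
  unfold pvSF
  have htf : (s1 ++ s2).toFinset = (str1.toList ++ str2.toList).toFinset :=
    List.toFinset_eq_of_perm _ _ (hperm1.append hperm2)
  rw [htf]
  apply Finset.sum_congr rfl
  intro c _
  rw [hperm1.count_eq, hperm2.count_eq]

-- ===== VERDICT (by name: the statement is the Claim_ definition above) =====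
theorem compare_items_num_spec : Claim_equal_compare_items_num := by
  intro str1 str2 _
  unfold Spec_compare_items_num
  rw [compare_items_num_eq_pvSF, compare_items_num_alt_eq_pvSF]
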